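-- pv_equiv track=rewrite | github.com/seonwookim92/watson-eval | evaluate_entity_typing.py | _ancestors
-- ===== SOURCE A (Python) =====
-- from collections import deque
-- from typing import Dict, List, Optional, Set, Tuple
--
-- def _ancestors(start: str, parents: Dict[str, Set[str]], max_depth: int) -> Dict[str, int]:
--     visited: Dict[str, int] = {start: 0}
--     queue: deque = deque([(start, 0)])
--     while queue:
--         node, depth = queue.popleft()
--         if depth >= max_depth: continue
--         for parent in parents.get(node, set()):
--             if parent not in visited:
--                 visited[parent] = depth + 1
--                 queue.append((parent, depth + 1))
--     return visited
-- ===== SOURCE B (Python) =====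
-- def _ancestors(start: str, parents, max_depth: int):
--     # Queue-free stratified fixpoint: the visited dict is the only state.
--     # Round d rescans visited, expands exactly the entries recorded at depth d-1,
--     # and stops as soon as a round adds nothing new.
--     visited = {start: 0}
--     for d in range(1, max_depth + 1):
--         hit = False
--         for node, dep in list(visited.items()):
--             if dep == d - 1:
--                 for p in parents.get(node, set()):
--                     if p not in visited:
--                         visited[p] = d
--                         hit = True
--         if not hit:
--             break
--     return visited
-- ===== Notes on version B (the rewrite author's own statement) =====
-- stated objective: alternative
-- what changed: Replaces the worklist BFS (a deque of (node,depth) pairs popped and pushed) by a queue-free stratified fixpoint: round d rescans the visited dict itself, expands exactly the entries recorded at depth d-1, and stops when a round adds nothing, so the output dict is the only state.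
import Mathlib
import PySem

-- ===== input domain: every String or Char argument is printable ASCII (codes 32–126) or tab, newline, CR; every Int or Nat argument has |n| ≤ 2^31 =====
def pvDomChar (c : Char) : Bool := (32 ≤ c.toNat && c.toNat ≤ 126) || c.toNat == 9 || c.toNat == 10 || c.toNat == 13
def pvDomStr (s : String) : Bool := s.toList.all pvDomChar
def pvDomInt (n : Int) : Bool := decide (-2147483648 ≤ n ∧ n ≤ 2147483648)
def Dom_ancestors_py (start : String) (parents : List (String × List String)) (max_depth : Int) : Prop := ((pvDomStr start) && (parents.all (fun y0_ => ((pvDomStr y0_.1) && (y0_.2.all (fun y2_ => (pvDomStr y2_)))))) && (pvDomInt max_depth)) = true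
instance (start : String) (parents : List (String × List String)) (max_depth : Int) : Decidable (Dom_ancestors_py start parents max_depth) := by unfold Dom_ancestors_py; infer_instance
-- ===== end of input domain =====

-- B replaces A's worklist BFS (deque of (node, depth) pairs) by a queue-free stratified
-- fixpoint: round d rescans the visited dict itself, expands the entries recorded at
-- depth d-1, and stops when a round adds nothing — objective: alternative.

-- ===== PORT A =====
-- body of A's inner 'for parent in parents.get(node, …)' loop: state = (visited, queue)
def ancestorsStepA (depth : Int) (s : PySem.Dict String Int × List (String × Int))
    (p : String) : PySem.Dict String Int × List (String × Int) :=
  if (s.1.get? p).isSome then s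
  else (s.1.insert p (depth + 1), s.2 ++ [(p, depth + 1)])

-- termination helpers for A's while-loop (cited by decreasing_by only)
theorem ancestorsCntInsert (U : List String) (v : PySem.Dict String Int) (p : String) (x : Int)
    (hp : p ∈ U) (hv : (v.get? p).isSome = false) :
    U.countP (fun n => ((v.insert p x).get? n).isNone) + 1
      ≤ U.countP (fun n => (v.get? n).isNone) := by
  obtain ⟨U1, U2, rfl⟩ := List.append_of_mem hp
  simp only [List.countP_append, List.countP_cons]
  have h1 : U1.countP (fun n => ((v.insert p x).get? n).isNone)
      ≤ U1.countP (fun n => (v.get? n).isNone) := by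
    apply List.countP_mono_left
    intro a _ ha
    by_cases hap : a = p
    · subst hap; simp [PySem.Dict.get?_insert_self] at ha
    · rwa [PySem.Dict.get?_insert_of_ne _ _ hap] at ha
  have h2 : U2.countP (fun n => ((v.insert p x).get? n).isNone)
      ≤ U2.countP (fun n => (v.get? n).isNone) := by
    apply List.countP_mono_left
    intro a _ ha
    by_cases hap : a = p
    · subst hap; simp [PySem.Dict.get?_insert_self] at ha
    · rwa [PySem.Dict.get?_insert_of_ne _ _ hap] at ha
  have hppred : (v.get? p).isNone = true := by
    cases h : v.get? p with
    | none => rfl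
    | some w => rw [h] at hv; simp at hv
  have hppred' : ((v.insert p x).get? p).isNone = false := by
    rw [PySem.Dict.get?_insert_self]; rfl
  rw [hppred, hppred']
  simp only [if_true]
  norm_num
  omega

theorem ancestorsFoldAMeasure (U : List String) (d : Int) (ps : List String)
    (hps : ∀ p ∈ ps, p ∈ U) :
    ∀ (v : PySem.Dict String Int) (q : List (String × Int)),
    2 * U.countP (fun n => (((ps.foldl (ancestorsStepA d) (v, q)).1).get? n).isNone)
        + (ps.foldl (ancestorsStepA d) (v, q)).2.length
      ≤ 2 * U.countP (fun n => (v.get? n).isNone) + q.length := by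
  induction ps with
  | nil => intro v q; simp
  | cons x ps ih =>
    intro v q
    have hx : x ∈ U := hps x (List.mem_cons_self ..)
    have hps' : ∀ p ∈ ps, p ∈ U := fun p hp => hps p (List.mem_cons_of_mem _ hp)
    simp only [List.foldl_cons]
    by_cases h : ((v.get? x).isSome : Bool) = true
    · rw [show ancestorsStepA d (v, q) x = (v, q) by simp [ancestorsStepA, h]]
      exact ih hps' v q
    · rw [show ancestorsStepA d (v, q) x
          = (v.insert x (d + 1), q ++ [(x, d + 1)]) by simp [ancestorsStepA, h]]
      have := ih hps' (v.insert x (d + 1)) (q ++ [(x, d + 1)])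
      have hins := ancestorsCntInsert U v x (d + 1) hx (by simpa using h)
      simp only [List.length_append, List.length_cons, List.length_nil] at this ⊢
      omega

theorem ancestorsGetDSubset (pd : PySem.Dict String (List String)) (node : String) :
    ∀ p ∈ pd.getD node [], p ∈ pd.values.flatten := by
  intro p hp
  cases h : pd.get? node with
  | none =>
    rw [PySem.Dict.getD_eq_get?_getD, h] at hp; simp at hp
  | some l =>
    rw [PySem.Dict.getD_eq_get?_getD, h] at hp
    simp only [Option.getD_some] at hp
    have hitems := PySem.Dict.mem_items_of_get?_eq_some pd h
    exact List.mem_flatten.mpr ⟨l, List.mem_map.mpr ⟨(node, l), hitems, rfl⟩, hp⟩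

-- A's while-loop over the deque of (node, depth) pairs
def ancestorsLoopA (pd : PySem.Dict String (List String)) (max_depth : Int)
    (visited : PySem.Dict String Int) (queue : List (String × Int)) :
    PySem.Dict String Int :=
  match queue with
  | [] => visited
  | (node, depth) :: rest =>
    if max_depth ≤ depth then ancestorsLoopA pd max_depth visited rest
    else
      let s := (pd.getD node []).foldl (ancestorsStepA depth) (visited, rest)
      ancestorsLoopA pd max_depth s.1 s.2
termination_by
  2 * (pd.values.flatten.countP (fun n => (visited.get? n).isNone)) + queue.length
decreasing_by
  · simp only [List.length_cons]; omega
  · have := ancestorsFoldAMeasure (pd.values.flatten) depth (pd.getD node [])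
      (ancestorsGetDSubset pd node) visited rest
    simp only [List.length_cons]
    omega

def ancestors_py (start : String) (parents : List (String × List String)) (max_depth : Int) : List (String × Int) :=
  let pd := PySem.Dict.ofList parents
  (ancestorsLoopA pd max_depth ((PySem.Dict.empty).insert start 0) [(start, 0)]).items

-- ===== PORT B =====
-- body of B's 'for node, dep in list(visited.items())' scan for round d:
-- state = (visited, hit); only entries recorded at depth d - 1 are expanded
def ancestorsScanStep (pd : PySem.Dict String (List String)) (d : Int)
    (s : PySem.Dict String Int × Bool) (nd : String × Int) :
    PySem.Dict String Int × Bool :=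
  if nd.2 == d - 1 then
    (pd.getD nd.1 []).foldl
      (fun s p =>
        if (s.1.get? p).isSome then s
        else (s.1.insert p d, true))
      s
  else s

-- B's 'for d in range(1, max_depth + 1)' loop with early break; k = remaining rounds
def ancestorsRoundsB (pd : PySem.Dict String (List String))
    (visited : PySem.Dict String Int) (d : Int) (k : Nat) :
    PySem.Dict String Int :=
  match k with
  | 0 => visited
  | k + 1 =>
    let s := visited.items.foldl (ancestorsScanStep pd d) (visited, false)
    if s.2 = false then s.1
    else ancestorsRoundsB pd s.1 (d + 1) k

def ancestors_py_alt (start : String) (parents : List (String × List String)) (max_depth : Int) : List (String × Int) :=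
  let pd := PySem.Dict.ofList parents
  (ancestorsRoundsB pd ((PySem.Dict.empty).insert start 0) 1 max_depth.toNat).items

-- ===== PRECONDITION & SPEC =====
def Spec_ancestors_py (start : String) (parents : List (String × List String)) (max_depth : Int) (out : List (String × Int)) : Prop := out = ancestors_py_alt start parents max_depth
instance (start : String) (parents : List (String × List String)) (max_depth : Int) (out : List (String × Int)) : Decidable (Spec_ancestors_py start parents max_depth out) := by unfold Spec_ancestors_py; infer_instance

-- ===== CLAIM (what is proved, stated in full; the proofs are below) =====
def Claim_equal_ancestors_py : Prop := ∀ (start : String) (parents : List (String × List String)) (max_depth : Int), Dom_ancestors_py start parents max_depth → Spec_ancestors_py start parents max_depth (ancestors_py start parents max_depth)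

-- ===== LEMMAS AND PROOFS =====

-- PROOF-ONLY intermediate: level-synchronous BFS over an explicit frontier list,
-- used as a bridge between A's queue and B's dict rescans
def ancestorsStepF (pd : PySem.Dict String (List String)) (d : Int)
    (s : PySem.Dict String Int × List String) (node : String) :
    PySem.Dict String Int × List String :=
  (pd.getD node []).foldl
    (fun s p =>
      if (s.1.get? p).isSome then s
      else (s.1.insert p (d + 1), s.2 ++ [p]))
    s

def ancestorsLoopF (pd : PySem.Dict String (List String)) (max_depth : Int)
    (visited : PySem.Dict String Int) (frontier : List String) (d : Int) (k : Nat) :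
    PySem.Dict String Int :=
  match k with
  | 0 => visited
  | k + 1 =>
    let s := frontier.foldl (ancestorsStepF pd d) (visited, [])
    if s.2 = [] then s.1
    else ancestorsLoopF pd max_depth s.1 s.2 (d + 1) k

-- entries at depth ≥ max_depth only drain the queue
theorem ancestorsLoopA_drain (pd : PySem.Dict String (List String)) (md : Int)
    (q : List (String × Int)) (hq : ∀ x ∈ q, md ≤ x.2) :
    ∀ v, ancestorsLoopA pd md v q = v := by
  induction q with
  | nil => intro v; rw [ancestorsLoopA]
  | cons x rest ih =>
    intro v
    obtain ⟨n, d⟩ := x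
    rw [ancestorsLoopA]
    rw [if_pos (hq (n, d) (List.mem_cons_self ..))]
    exact ih (fun y hy => hq y (List.mem_cons_of_mem _ hy)) v

-- one node's inner loop: A appends depth-tagged parents behind the queue, F appends bare names
theorem ancestorsFold_rel (d : Int) (ps : List String) :
    ∀ (v : PySem.Dict String Int) (ns : List String) (q0 : List (String × Int)),
    ps.foldl (ancestorsStepA d) (v, q0 ++ ns.map (fun n => (n, d + 1)))
      = ((ps.foldl
            (fun s p =>
              if ((s : PySem.Dict String Int × List String).1.get? p).isSome then s
              else (s.1.insert p (d + 1), s.2 ++ [p])) (v, ns)).1,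
         q0 ++ (ps.foldl
            (fun s p =>
              if ((s : PySem.Dict String Int × List String).1.get? p).isSome then s
              else (s.1.insert p (d + 1), s.2 ++ [p])) (v, ns)).2.map (fun n => (n, d + 1))) := by
  induction ps with
  | nil => intro v ns q0; simp
  | cons x ps ih =>
    intro v ns q0
    simp only [List.foldl_cons]
    by_cases h : ((v.get? x).isSome : Bool) = true
    · rw [show ancestorsStepA d (v, q0 ++ ns.map (fun n => (n, d + 1))) x
          = (v, q0 ++ ns.map (fun n => (n, d + 1))) by simp [ancestorsStepA, h]]
      rw [show (if ((v.get? x).isSome : Bool) = true then (v, ns)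
          else (v.insert x (d + 1), ns ++ [x])) = (v, ns) by simp [h]]
      exact ih v ns q0
    · rw [show ancestorsStepA d (v, q0 ++ ns.map (fun n => (n, d + 1))) x
          = (v.insert x (d + 1), (q0 ++ ns.map (fun n => (n, d + 1))) ++ [(x, d + 1)])
          by simp [ancestorsStepA, h]]
      rw [show (if ((v.get? x).isSome : Bool) = true then (v, ns)
          else (v.insert x (d + 1), ns ++ [x])) = (v.insert x (d + 1), ns ++ [x]) by simp [h]]
      rw [show (q0 ++ ns.map (fun n => (n, d + 1))) ++ [(x, d + 1)]
          = q0 ++ (ns ++ [x]).map (fun n => (n, d + 1)) by simp]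
      exact ih (v.insert x (d + 1)) (ns ++ [x]) q0

-- A processes one whole level exactly like F's frontier fold
theorem ancestorsLoopA_level (pd : PySem.Dict String (List String)) (md d : Int)
    (hd : d < md) (F : List String) :
    ∀ (v : PySem.Dict String Int) (ns : List String),
    ancestorsLoopA pd md v (F.map (fun n => (n, d)) ++ ns.map (fun n => (n, d + 1)))
      = ancestorsLoopA pd md (F.foldl (ancestorsStepF pd d) (v, ns)).1
          ((F.foldl (ancestorsStepF pd d) (v, ns)).2.map (fun n => (n, d + 1))) := by
  induction F with
  | nil => intro v ns; simp
  | cons n F ih =>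
    intro v ns
    simp only [List.map_cons, List.cons_append, List.foldl_cons]
    rw [ancestorsLoopA]
    rw [if_neg (by omega)]
    have hrel := ancestorsFold_rel d (pd.getD n []) v ns (F.map (fun n => (n, d)))
    simp only [hrel]
    have hstep : ancestorsStepF pd d (v, ns) n
        = (pd.getD n []).foldl
            (fun s p =>
              if ((s : PySem.Dict String Int × List String).1.get? p).isSome then s
              else (s.1.insert p (d + 1), s.2 ++ [p])) (v, ns) := rfl
    rw [hstep]
    exact ih _ _

-- main induction A = F: k remaining levels, current depth d with d + k = md
theorem ancestorsLoopA_eq_loopF (pd : PySem.Dict String (List String)) (md : Int) :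
    ∀ (k : Nat) (v : PySem.Dict String Int) (F : List String) (d : Int),
    d + k = md →
    ancestorsLoopA pd md v (F.map (fun n => (n, d))) = ancestorsLoopF pd md v F d k := by
  intro k
  induction k with
  | zero =>
    intro v F d hd
    rw [ancestorsLoopF]
    apply ancestorsLoopA_drain
    intro x hx
    obtain ⟨n, hn, rfl⟩ := List.mem_map.mp hx
    simp; omega
  | succ k ih =>
    intro v F d hd
    have hdm : d < md := by omega
    have hlevel := ancestorsLoopA_level pd md d hdm F v []
    simp only [List.map_nil, List.append_nil] at hlevel
    rw [hlevel]
    conv_rhs => rw [ancestorsLoopF]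
    by_cases hnil : (F.foldl (ancestorsStepF pd d) (v, [])).2 = []
    · rw [if_pos hnil, hnil]
      simp only [List.map_nil]
      rw [ancestorsLoopA]
    · rw [if_neg hnil]
      exact ih _ _ _ (by omega)

-- B's round scan skips every dict entry not recorded at depth d - 1
theorem ancestorsScanFilter (pd : PySem.Dict String (List String)) (dd : Int) :
    ∀ (l : List (String × Int)) (s : PySem.Dict String Int × Bool),
    l.foldl (ancestorsScanStep pd dd) s
      = (l.filter (fun e => e.2 == dd - 1)).foldl (ancestorsScanStep pd dd) s := by
  intro l
  induction l with
  | nil => intro s; simp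
  | cons x l ih =>
    intro s
    by_cases hx : (x.2 == dd - 1) = true
    · simp only [List.foldl_cons, List.filter_cons, hx, if_true]
      exact ih _
    · simp only [List.foldl_cons, List.filter_cons, hx]
      rw [show ancestorsScanStep pd dd s x = s by
        simp only [ancestorsScanStep, hx]; simp]
      simp only [Bool.false_eq_true, if_false]
      exact ih s

-- one node's parents: scan's hit flag tracks nonemptiness of F's next frontier
theorem ancestorsInner_rel (d : Int) (ps : List String) :
    ∀ (v : PySem.Dict String Int) (h : Bool) (ns : List String), h = !ns.isEmpty →
    ps.foldl
        (fun s p =>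
          if ((s : PySem.Dict String Int × Bool).1.get? p).isSome then s
          else (s.1.insert p (d + 1), true)) (v, h)
      = ((ps.foldl
            (fun s p =>
              if ((s : PySem.Dict String Int × List String).1.get? p).isSome then s
              else (s.1.insert p (d + 1), s.2 ++ [p])) (v, ns)).1,
         !(ps.foldl
            (fun s p =>
              if ((s : PySem.Dict String Int × List String).1.get? p).isSome then s
              else (s.1.insert p (d + 1), s.2 ++ [p])) (v, ns)).2.isEmpty) := by
  induction ps with
  | nil => intro v h ns hh; simp [hh]
  | cons x ps ih =>
    intro v h ns hh
    simp only [List.foldl_cons]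
    by_cases hx : ((v.get? x).isSome : Bool) = true
    · simp only [hx, if_true]
      exact ih v h ns hh
    · simp only [hx, Bool.false_eq_true, if_false]
      exact ih (v.insert x (d + 1)) true (ns ++ [x]) (by simp)

-- a whole round: scanning the level-d entries = F's frontier fold, hit = frontier nonempty
theorem ancestorsRound_rel (pd : PySem.Dict String (List String)) (d : Int) (F : List String) :
    ∀ (v : PySem.Dict String Int) (h : Bool) (ns : List String), h = !ns.isEmpty →
    (F.map (fun n => (n, d))).foldl (ancestorsScanStep pd (d + 1)) (v, h)
      = ((F.foldl (ancestorsStepF pd d) (v, ns)).1,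
         !(F.foldl (ancestorsStepF pd d) (v, ns)).2.isEmpty) := by
  induction F with
  | nil => intro v h ns hh; simp [hh]
  | cons n F ih =>
    intro v h ns hh
    simp only [List.map_cons, List.foldl_cons]
    rw [show ancestorsScanStep pd (d + 1) (v, h) (n, d)
        = (pd.getD n []).foldl
            (fun s p =>
              if ((s : PySem.Dict String Int × Bool).1.get? p).isSome then s
              else (s.1.insert p (d + 1), true)) (v, h) by
      simp only [ancestorsScanStep, add_sub_cancel_right, beq_self_eq_true, if_true]]
    rw [ancestorsInner_rel d (pd.getD n []) v h ns hh]
    rw [show ancestorsStepF pd d (v, ns) n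
        = (pd.getD n []).foldl
            (fun s p =>
              if ((s : PySem.Dict String Int × List String).1.get? p).isSome then s
              else (s.1.insert p (d + 1), s.2 ++ [p])) (v, ns) from rfl]
    exact ih _ _ _ rfl

-- invariant through one node's parents: newly inserted depth-(d+1) entries are
-- exactly the appended frontier names, in order, and all values stay ≤ d+1
theorem ancestorsInner_inv (d : Int) (ps : List String) :
    ∀ (v : PySem.Dict String Int) (ns : List String),
    v.items.filter (fun e => e.2 == d + 1) = ns.map (fun n => (n, d + 1)) →
    (∀ e ∈ v.items, e.2 ≤ d + 1) →
    ((ps.foldl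
        (fun s p =>
          if ((s : PySem.Dict String Int × List String).1.get? p).isSome then s
          else (s.1.insert p (d + 1), s.2 ++ [p])) (v, ns)).1.items.filter
            (fun e => e.2 == d + 1)
        = (ps.foldl
            (fun s p =>
              if ((s : PySem.Dict String Int × List String).1.get? p).isSome then s
              else (s.1.insert p (d + 1), s.2 ++ [p])) (v, ns)).2.map (fun n => (n, d + 1)))
    ∧ (∀ e ∈ (ps.foldl
        (fun s p =>
          if ((s : PySem.Dict String Int × List String).1.get? p).isSome then s
          else (s.1.insert p (d + 1), s.2 ++ [p])) (v, ns)).1.items, e.2 ≤ d + 1) := by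
  induction ps with
  | nil => intro v ns h1 h2; exact ⟨h1, h2⟩
  | cons x ps ih =>
    intro v ns h1 h2
    simp only [List.foldl_cons]
    by_cases hx : ((v.get? x).isSome : Bool) = true
    · simp only [hx, if_true]
      exact ih v ns h1 h2
    · simp only [hx, Bool.false_eq_true, if_false]
      have hc : v.contains x = false := by
        rw [PySem.Dict.contains_eq_isSome_get?]; simpa using hx
      have hitems : (v.insert x (d + 1)).items = v.items ++ [(x, d + 1)] := by
        rw [PySem.Dict.items_insert, hc]; simp
      apply ih
      · rw [hitems, List.filter_append, h1]
        simp
      · rw [hitems]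
        intro e he
        rcases List.mem_append.mp he with h | h
        · exact h2 e h
        · simp only [List.mem_singleton] at h; subst h; simp

-- the same invariant through a whole frontier
theorem ancestorsRoundF_inv (pd : PySem.Dict String (List String)) (d : Int) (F : List String) :
    ∀ (v : PySem.Dict String Int) (ns : List String),
    v.items.filter (fun e => e.2 == d + 1) = ns.map (fun n => (n, d + 1)) →
    (∀ e ∈ v.items, e.2 ≤ d + 1) →
    ((F.foldl (ancestorsStepF pd d) (v, ns)).1.items.filter (fun e => e.2 == d + 1)
        = (F.foldl (ancestorsStepF pd d) (v, ns)).2.map (fun n => (n, d + 1)))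
    ∧ (∀ e ∈ (F.foldl (ancestorsStepF pd d) (v, ns)).1.items, e.2 ≤ d + 1) := by
  induction F with
  | nil => intro v ns h1 h2; exact ⟨h1, h2⟩
  | cons n F ih =>
    intro v ns h1 h2
    simp only [List.foldl_cons]
    have hstep := ancestorsInner_inv d (pd.getD n []) v ns h1 h2
    rw [show ancestorsStepF pd d (v, ns) n
        = (pd.getD n []).foldl
            (fun s p =>
              if ((s : PySem.Dict String Int × List String).1.get? p).isSome then s
              else (s.1.insert p (d + 1), s.2 ++ [p])) (v, ns) from rfl]
    exact ih _ _ hstep.1 hstep.2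

-- bridge F = B: level-synchronous frontier BFS equals B's dict rescans
theorem ancestorsLoopF_eq_roundsB (pd : PySem.Dict String (List String)) (md : Int) :
    ∀ (k : Nat) (v : PySem.Dict String Int) (F : List String) (d : Int),
    v.items.filter (fun e => e.2 == d) = F.map (fun n => (n, d)) →
    (∀ e ∈ v.items, e.2 ≤ d) →
    ancestorsLoopF pd md v F d k = ancestorsRoundsB pd v (d + 1) k := by
  intro k
  induction k with
  | zero => intro v F d h1 h2; rw [ancestorsLoopF, ancestorsRoundsB]
  | succ k ih =>
    intro v F d h1 h2
    rw [ancestorsLoopF, ancestorsRoundsB]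
    have hscan : v.items.foldl (ancestorsScanStep pd (d + 1)) (v, false)
        = ((F.foldl (ancestorsStepF pd d) (v, [])).1,
           !(F.foldl (ancestorsStepF pd d) (v, [])).2.isEmpty) := by
      rw [ancestorsScanFilter]
      rw [show (fun (e : String × Int) => e.2 == d + 1 - 1) = (fun e => e.2 == d) by
        funext e; rw [add_sub_cancel_right]]
      rw [h1]
      exact ancestorsRound_rel pd d F v false [] rfl
    simp only [hscan]
    have hinv := ancestorsRoundF_inv pd d F v []
      (by
        simp only [List.map_nil]
        rw [List.eq_nil_iff_forall_not_mem]
        intro e he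
        rcases List.mem_filter.mp he with ⟨hmem, hq⟩
        have := h2 e hmem
        have : e.2 = d + 1 := by simpa using hq
        omega)
      (fun e he => by have := h2 e he; omega)
    by_cases hnil : (F.foldl (ancestorsStepF pd d) (v, [])).2 = []
    · rw [if_pos hnil, hnil]
      simp
    · rw [if_neg hnil]
      rw [show (!(F.foldl (ancestorsStepF pd d) (v, [])).2.isEmpty) = true by
        simp [hnil]]
      simp only [Bool.true_eq_false, if_false]
      exact ih _ _ _ hinv.1 hinv.2

-- ===== VERDICT (by name: the statement is the Claim_ definition above) =====
theorem ancestors_py_spec : Claim_equal_ancestors_py := by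
  intro start parents max_depth _
  unfold Spec_ancestors_py ancestors_py ancestors_py_alt
  show (ancestorsLoopA (PySem.Dict.ofList parents) max_depth ((PySem.Dict.empty).insert start 0) [(start, 0)]).items
      = (ancestorsRoundsB (PySem.Dict.ofList parents) ((PySem.Dict.empty).insert start 0) 1 max_depth.toNat).items
  congr 1
  by_cases hmd : max_depth ≤ 0
  · rw [show max_depth.toNat = 0 by omega, ancestorsRoundsB]
    apply ancestorsLoopA_drain
    intro x hx
    simp only [List.mem_singleton] at hx
    subst hx
    simpa using hmd
  · have hA := ancestorsLoopA_eq_loopF (PySem.Dict.ofList parents) max_depth max_depth.toNat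
      ((PySem.Dict.empty).insert start 0) [start] 0 (by omega)
    rw [show [(start, (0 : Int))] = [start].map (fun n => (n, (0 : Int))) by simp] 
    rw [hA]
    have hitems : ((PySem.Dict.empty : PySem.Dict String Int).insert start 0).items
        = [(start, 0)] := by
      rw [PySem.Dict.items_insert]
      simp [PySem.Dict.empty]
    rw [show (1 : Int) = 0 + 1 by norm_num]
    apply ancestorsLoopF_eq_roundsB
    · rw [hitems]; simp
    · rw [hitems]; intro e he; simp at he; subst he; simp
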